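-- pv_equiv track=rewrite | github.com/GenesisBlock3301/coding_interview_preparation | stack/great_string.py | great_string
-- ===== SOURCE A (Python) =====
-- def great_string(s):
--     stack = []
--     for i in s:
--         if stack:
--             if (ord(stack[-1]) != ord(i)) and (stack[-1].lower() == i.lower()):
--                 stack.pop()
--             else:
--                 stack.append(i)
--         else:
--             stack.append(i)
--
--     return "".join(stack)
-- ===== SOURCE B (Python) =====
-- def great_string(s):
--     # Repeated-scan fixed point: each pass walks the string left to right and
--     # drops every adjacent pair that differs in ord but agrees after .lower();
--     # repeat until a pass changes nothing.
--     cur = list(s)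
--     while True:
--         out = []
--         i = 0
--         while i < len(cur):
--             if i + 1 < len(cur) and cur[i] != cur[i + 1] and cur[i].lower() == cur[i + 1].lower():
--                 i += 2
--             else:
--                 out.append(cur[i])
--                 i += 1
--         if out == cur:
--             return "".join(cur)
--         cur = out
-- ===== Notes on version B (the rewrite author's own statement) =====
-- stated objective: alternative
-- what changed: Replaces the single left-to-right stack pass with a repeated whole-string scan that deletes case-differing adjacent pairs and iterates to a fixed point; confluence of the cancellation rewriting (each character has at most one case partner) makes the results identical.
import Mathlib
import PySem

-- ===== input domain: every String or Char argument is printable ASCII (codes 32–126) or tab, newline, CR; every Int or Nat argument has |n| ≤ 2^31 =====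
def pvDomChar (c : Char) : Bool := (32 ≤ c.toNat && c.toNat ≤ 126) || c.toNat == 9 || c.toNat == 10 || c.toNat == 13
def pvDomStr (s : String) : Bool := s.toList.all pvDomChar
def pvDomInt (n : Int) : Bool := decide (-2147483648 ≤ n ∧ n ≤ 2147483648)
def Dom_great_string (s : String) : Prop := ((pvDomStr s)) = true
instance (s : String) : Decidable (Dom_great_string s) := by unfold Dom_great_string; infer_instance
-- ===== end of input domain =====

-- B is an alternative algorithm with the same result (not claimed faster): a repeated
-- whole-string scan deleting case-differing adjacent pairs, iterated to a fixed point,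
-- instead of A's single stack pass.  PySem.Chars.lowerChar is exact for .lower() on Dom (ASCII).

-- ===== PORT A =====
-- The Python stack is kept reversed (head = top; the join at the end reverses back);
-- ord(x) != ord(y) on 1-char strings is exactly x ≠ y on Char.
def great_string_step (st : List Char) (c : Char) : List Char :=
  match st with
  | [] => [c]                        -- stack empty: append
  | t :: rest =>
    if t ≠ c ∧ PySem.Chars.lowerChar t = PySem.Chars.lowerChar c then rest   -- pop
    else c :: t :: rest                                                      -- append

def great_string (s : String) : String :=
  String.mk ((s.toList.foldl great_string_step []).reverse)

-- ===== PORT B =====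
def gsCancel (a b : Char) : Bool :=
  a != b && (PySem.Chars.lowerChar a == PySem.Chars.lowerChar b)

-- one pass of Source B's inner while loop: walk, dropping each cancelling adjacent pair
def gsPass : List Char → List Char
  | [] => []
  | [a] => [a]
  | a :: b :: t => if gsCancel a b then gsPass t else a :: gsPass (b :: t)

theorem gsPass_length_le : ∀ l : List Char, (gsPass l).length ≤ l.length := by
  intro l
  fun_induction gsPass l with
  | case1 => exact Nat.le_refl _
  | case2 => exact Nat.le_refl _
  | case3 a b t h ih => simp only [List.length_cons]; omega
  | case4 a b t h ih =>
      simp only [List.length_cons] at ih ⊢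
      omega

theorem gsPass_lt_of_ne : ∀ l : List Char, gsPass l ≠ l → (gsPass l).length < l.length := by
  intro l
  fun_induction gsPass l with
  | case1 => intro h; exact absurd rfl h
  | case2 => intro h; exact absurd rfl h
  | case3 a b t h ih =>
      intro _
      simp only [List.length_cons]
      have := gsPass_length_le t
      omega
  | case4 a b t h ih =>
      intro hne
      simp only [List.length_cons] at hne ⊢
      have hne' : gsPass (b :: t) ≠ b :: t := by
        intro he; exact hne (by rw [he])
      have := ih hne'
      simp only [List.length_cons] at this
      omega

-- Source B's outer while loop: iterate the pass until it changes nothing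
def gsFix (l : List Char) : List Char :=
  let p := gsPass l
  if _h : p = l then l else gsFix p
termination_by l.length
decreasing_by exact gsPass_lt_of_ne l _h

def great_string_alt (s : String) : String :=
  String.mk (gsFix s.toList)

-- ===== PRECONDITION & SPEC =====
def Spec_great_string (s : String) (out : String) : Prop := out = great_string_alt s
instance (s : String) (out : String) : Decidable (Spec_great_string s out) := by unfold Spec_great_string; infer_instance

-- ===== CLAIM (what is proved, stated in full; the proofs are below) =====
def Claim_equal_great_string : Prop := ∀ (s : String), Dom_great_string s → Spec_great_string s (great_string s)

-- ===== LEMMAS AND PROOFS =====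

-- a list with no cancelling adjacent pair (a "reduced" / pass-stable string)
def gsRed (l : List Char) : Prop := List.IsChain (fun a b => gsCancel a b = false) l

theorem toNat_ofNat_valid {n : Nat} (h : n < 55296) : (Char.ofNat n).toNat = n := by
  unfold Char.ofNat
  split
  · rfl
  · next hv => exact absurd (Or.inl h) hv

theorem char_le_iff_toNat {a b : Char} : a ≤ b ↔ a.toNat ≤ b.toNat := by
  rw [Char.le_def]; exact UInt32.le_iff_toNat_le

theorem isupper_iff (c : Char) : PySem.Chars.isupper c = true ↔ 65 ≤ c.toNat ∧ c.toNat ≤ 90 := by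
  have hA : ('A').toNat = 65 := rfl
  have hZ : ('Z').toNat = 90 := rfl
  simp [PySem.Chars.isupper, char_le_iff_toNat, hA, hZ]

theorem lowerChar_toNat (c : Char) :
    (PySem.Chars.lowerChar c).toNat =
      if 65 ≤ c.toNat ∧ c.toNat ≤ 90 then c.toNat + 32 else c.toNat := by
  unfold PySem.Chars.lowerChar
  by_cases h : PySem.Chars.isupper c = true
  · rw [if_pos h, if_pos ((isupper_iff c).mp h)]
    exact toNat_ofNat_valid (by have := ((isupper_iff c).mp h).2; omega)
  · rw [if_neg h, if_neg (fun hb => h ((isupper_iff c).mpr hb))]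

theorem char_toNat_inj {a b : Char} (h : a.toNat = b.toNat) : a = b := by
  apply Char.ext; exact UInt32.toNat_inj.mp h

theorem gsCancel_symm (a b : Char) : gsCancel a b = gsCancel b a := by
  unfold gsCancel
  rw [bne_comm]
  congr 1
  cases h : PySem.Chars.lowerChar a == PySem.Chars.lowerChar b
  · rw [beq_eq_false_iff_ne] at h
    exact (beq_eq_false_iff_ne.mpr (fun he => h he.symm)).symm
  · rw [beq_iff_eq] at h
    exact (beq_iff_eq.mpr h.symm).symm

-- each character has at most one cancellation partner (its other-case form)
theorem gsCancel_unique {a b d : Char} (h1 : gsCancel a b = true) (h2 : gsCancel a d = true) :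
    b = d := by
  simp only [gsCancel, Bool.and_eq_true, bne_iff_ne, ne_eq, beq_iff_eq] at h1 h2
  obtain ⟨hab, hlab⟩ := h1
  obtain ⟨had, hlad⟩ := h2
  have t1 := congrArg Char.toNat hlab
  have t2 := congrArg Char.toNat hlad
  rw [lowerChar_toNat, lowerChar_toNat] at t1
  rw [lowerChar_toNat, lowerChar_toNat] at t2
  have nab : a.toNat ≠ b.toNat := fun h => hab (char_toNat_inj h)
  have nad : a.toNat ≠ d.toNat := fun h => had (char_toNat_inj h)
  apply char_toNat_inj
  split_ifs at t1 t2 <;> omega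

-- A's if-condition is exactly gsCancel
theorem cond_iff_gsCancel (t c : Char) :
    (t ≠ c ∧ PySem.Chars.lowerChar t = PySem.Chars.lowerChar c) ↔ gsCancel t c = true := by
  simp [gsCancel]

theorem not_cond_of_false {t c : Char} (h : gsCancel t c = false) :
    ¬(t ≠ c ∧ PySem.Chars.lowerChar t = PySem.Chars.lowerChar c) := by
  intro hp
  rw [(cond_iff_gsCancel t c).mp hp] at h
  cases h

theorem cancel_symm_true {a b : Char} (h : gsCancel a b = true) : gsCancel b a = true := by
  rw [gsCancel_symm]; exact h

-- A's step keeps the stack reduced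
theorem step_red {st : List Char} (c : Char) (h : gsRed st) : gsRed (great_string_step st c) := by
  unfold gsRed
  match st with
  | [] => exact List.IsChain.singleton _
  | t :: rest =>
    simp only [great_string_step]
    split_ifs with hc
    · exact h.tail
    · refine List.IsChain.cons_cons ?_ h
      rw [gsCancel_symm]
      cases hq : gsCancel t c
      · rfl
      · exact absurd ((cond_iff_gsCancel t c).mpr hq) hc

-- popping law: pushing a cancelling pair onto a reduced stack is a no-op
theorem step_step_cancel {st : List Char} {a b : Char} (hred : gsRed st)
    (hc : gsCancel a b = true) :
    great_string_step (great_string_step st a) b = st := by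
  match st with
  | [] =>
    show great_string_step [a] b = []
    simp only [great_string_step]
    rw [if_pos ((cond_iff_gsCancel a b).mpr hc)]
  | d :: t' =>
    by_cases hda : gsCancel d a = true
    · have hstep : great_string_step (d :: t') a = t' := by
        simp only [great_string_step]
        rw [if_pos ((cond_iff_gsCancel d a).mpr hda)]
      rw [hstep]
      have hbd : b = d := gsCancel_unique hc (cancel_symm_true hda)
      subst hbd
      match t' with
      | [] => rfl
      | e :: t'' =>
        have hde : gsCancel b e = false := by
          unfold gsRed at hred
          exact List.IsChain.rel_head (R := fun a b => gsCancel a b = false) hred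
        have heb : gsCancel e b = false := by rw [gsCancel_symm]; exact hde
        simp only [great_string_step]
        rw [if_neg (not_cond_of_false heb)]
    · have hstep : great_string_step (d :: t') a = a :: d :: t' := by
        simp only [great_string_step]
        rw [if_neg (fun hp => hda ((cond_iff_gsCancel d a).mp hp))]
      rw [hstep]
      simp only [great_string_step]
      rw [if_pos ((cond_iff_gsCancel a b).mpr hc)]

-- one pass does not change what A's stack loop computes (from a reduced stack)
theorem foldl_gsPass (l : List Char) : ∀ st : List Char, gsRed st →
    List.foldl great_string_step st (gsPass l) = List.foldl great_string_step st l := by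
  fun_induction gsPass l with
  | case1 => intro st _; rfl
  | case2 a => intro st _; rfl
  | case3 a b t h ih =>
      intro st hst
      simp only [List.foldl_cons]
      rw [ih st hst, step_step_cancel hst h]
  | case4 a b t h ih =>
      intro st hst
      simp only [List.foldl_cons]
      exact ih (great_string_step st a) (step_red a hst)

-- iterating the pass to the fixed point does not change it either
theorem foldl_gsFix (l : List Char) : ∀ st : List Char, gsRed st →
    List.foldl great_string_step st (gsFix l) = List.foldl great_string_step st l := by
  fun_induction gsFix l with
  | case1 l p hp => intro st _; rfl
  | case2 l p hp ih =>
      intro st hst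
      rw [ih st hst, foldl_gsPass l st hst]

-- a fixed point of the pass has no cancelling adjacent pair
theorem gsRed_of_pass_eq (l : List Char) : gsPass l = l → gsRed l := by
  fun_induction gsPass l with
  | case1 => intro _; exact List.IsChain.nil
  | case2 a => intro _; exact List.IsChain.singleton _
  | case3 a b t h ih =>
      intro he
      have := gsPass_length_le t
      have := congrArg List.length he
      simp only [List.length_cons] at this
      omega
  | case4 a b t h ih =>
      intro he
      have he' : gsPass (b :: t) = b :: t := by
        injection he
      exact List.IsChain.cons_cons (by simpa using h) (ih he')

theorem gsRed_gsFix (l : List Char) : gsRed (gsFix l) := by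
  fun_induction gsFix l with
  | case1 l p hp => exact gsRed_of_pass_eq l hp
  | case2 l p hp ih => exact ih

-- running A's stack loop over a reduced string just reverses it onto the stack
theorem foldl_red (l : List Char) : ∀ st : List Char,
    List.IsChain (fun a b => gsCancel a b = false) (st ++ l) →
    List.foldl great_string_step st.reverse l = l.reverse ++ st.reverse := by
  induction l with
  | nil => intro st _; simp
  | cons a l' ih =>
      intro st hch
      have hstep : great_string_step st.reverse a = a :: st.reverse := by
        match hrev : st.reverse with
        | [] => rfl
        | t :: rest =>
          have hlast : st.getLast? = some t := by
            rw [← List.head?_reverse, hrev]; rfl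
          have hta : gsCancel t a = false := by
            have := (List.isChain_append.mp hch).2.2
            exact this t hlast a rfl
          simp only [great_string_step]
          rw [if_neg (not_cond_of_false hta)]
      simp only [List.foldl_cons, hstep]
      have : (a :: st.reverse) = (st ++ [a]).reverse := by simp
      rw [this, ih (st ++ [a]) (by simpa using hch)]
      simp

-- ===== VERDICT (by name: the statement is the Claim_ definition above) =====
theorem great_string_spec : Claim_equal_great_string := by
  intro s _
  unfold Spec_great_string great_string great_string_alt
  have h1 : List.foldl great_string_step [] s.toList
      = List.foldl great_string_step [] (gsFix s.toList) :=
    (foldl_gsFix s.toList [] List.IsChain.nil).symm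
  have h2 : List.foldl great_string_step ([] : List Char).reverse (gsFix s.toList)
      = (gsFix s.toList).reverse ++ ([] : List Char).reverse :=
    foldl_red (gsFix s.toList) [] (by simpa using gsRed_gsFix s.toList)
  simp only [List.reverse_nil, List.append_nil] at h2
  rw [h1, h2]
  simp
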